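-- pv_equiv track=rewrite | github.com/cy15205969311/DeMark | crawlers/tuguaishou_818ps.py | _is_valid_image_src
-- ===== SOURCE A (Python) =====
-- def _is_valid_image_src(src: str) -> bool:
--     """
--     判断图片src是否有效
--     """
--     if not src:
--         return False
--
--     src_lower = src.lower()
--
--     # 必须包含图片相关路径或域名
--     valid_indicators = [
--         'pic/', 'image/', 'img/', 'photo/',
--         '818ps.com', 'tuguaishou.com',
--         '.jpg', '.png', '.webp', '.jpeg'
--     ]
--
--     return any(indicator in src_lower for indicator in valid_indicators)
-- ===== SOURCE B (Python) =====
-- _INDICATORS = (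
--     'pic/', 'image/', 'img/', 'photo/',
--     '818ps.com', 'tuguaishou.com',
--     '.jpg', '.png', '.webp', '.jpeg'
-- )
--
--
-- def _is_valid_image_src(src: str) -> bool:
--     """
--     判断图片src是否有效
--     """
--     if not src:
--         return False
--
--     s = src.lower()
--     # single left-to-right scan: at each position, test whether some indicator starts there
--     return any(s.startswith(ind, i) for i in range(len(s)) for ind in _INDICATORS)
-- ===== Notes on version B (the rewrite author's own statement) =====
-- stated objective: alternative
-- what changed: Replaces ten independent substring searches (one full 'in' scan per indicator) by a single left-to-right scan over the lowercased string that tests all indicators at each position, like a hand-rolled multi-pattern matcher.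
import Mathlib
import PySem

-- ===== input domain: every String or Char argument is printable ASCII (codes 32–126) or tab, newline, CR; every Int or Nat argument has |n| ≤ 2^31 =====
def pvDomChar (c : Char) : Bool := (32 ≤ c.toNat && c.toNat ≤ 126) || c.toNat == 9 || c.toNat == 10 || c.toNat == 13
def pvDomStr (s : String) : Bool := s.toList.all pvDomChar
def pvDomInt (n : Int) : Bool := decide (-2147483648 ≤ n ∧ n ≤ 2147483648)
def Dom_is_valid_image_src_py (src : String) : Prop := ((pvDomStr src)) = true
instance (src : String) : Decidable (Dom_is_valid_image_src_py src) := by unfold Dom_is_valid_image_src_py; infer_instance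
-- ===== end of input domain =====

-- B replaces ten independent substring searches by one left-to-right scan testing every indicator at each position (alternative decomposition, same cost class).


-- ===== PORT A =====
-- valid_indicators list of A
def pvValidIndicators : List String :=
  ["pic/", "image/", "img/", "photo/",
   "818ps.com", "tuguaishou.com",
   ".jpg", ".png", ".webp", ".jpeg"]

def is_valid_image_src_py (src : String) : Bool :=
  if src.toList = [] then false                         -- 'if not src: return False'
  else
    let src_lower := PySem.Str.lower src
    pvValidIndicators.any (fun indicator => PySem.Str.isIn indicator src_lower)

-- ===== PORT B =====
-- indicator tuple of B
def pvAltIndicators : List String :=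
  ["pic/", "image/", "img/", "photo/",
   "818ps.com", "tuguaishou.com",
   ".jpg", ".png", ".webp", ".jpeg"]

-- 'any(s.startswith(ind, i) for i in range(len(s)) for ind in _INDICATORS)':
-- recursion over the suffix starting at position i; s.startswith(ind, i) is isPrefixOf on that suffix (exact for ASCII)
def pvScan : List Char → Bool
  | [] => false
  | c :: rest => pvAltIndicators.any (fun ind => ind.toList.isPrefixOf (c :: rest)) || pvScan rest

def is_valid_image_src_py_alt (src : String) : Bool :=
  if src.toList = [] then false                         -- 'if not src: return False'
  else pvScan (PySem.Chars.lower src.toList)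

-- ===== PRECONDITION & SPEC =====
def Spec_is_valid_image_src_py (src : String) (out : Bool) : Prop := out = is_valid_image_src_py_alt src
instance (src : String) (out : Bool) : Decidable (Spec_is_valid_image_src_py src out) := by unfold Spec_is_valid_image_src_py; infer_instance

-- ===== CLAIM (what is proved, stated in full; the proofs are below) =====
def Claim_equal_is_valid_image_src_py : Prop := ∀ (src : String), Dom_is_valid_image_src_py src → Spec_is_valid_image_src_py src (is_valid_image_src_py src)

-- ===== LEMMAS AND PROOFS =====
-- the scan finds exactly the indicators occurring as an infix
lemma pvScan_eq_any_infix (cs : List Char) :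
    pvScan cs = pvAltIndicators.any (fun ind => decide (ind.toList <:+: cs)) := by
  induction cs with
  | nil => decide
  | cons c rest ih =>
      simp only [pvScan, ih]
      rw [Bool.eq_iff_iff]
      simp only [Bool.or_eq_true, List.any_eq_true, decide_eq_true_eq,
        List.infix_cons_iff, List.isPrefixOf_iff_prefix]
      aesop

-- ===== VERDICT (by name: the statement is the Claim_ definition above) =====
theorem is_valid_image_src_py_spec : Claim_equal_is_valid_image_src_py := by
  intro src _
  unfold Spec_is_valid_image_src_py is_valid_image_src_py is_valid_image_src_py_alt
  by_cases h : src.toList = []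
  · simp [h]
  · simp only [h, ite_false]
    rw [← PySem.Str.toList_lower, pvScan_eq_any_infix,
      show pvAltIndicators = pvValidIndicators from rfl]
    refine List.any_congr rfl ?_
    intro ind
    rw [Bool.eq_iff_iff, PySem.Str.isIn_iff_infix, decide_eq_true_eq]
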